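-- pv_equiv track=rewrite | github.com/mjumbewu/django-jstemplate | jstemplate/templatetags/ractivejs.py | generate_node_text
-- ===== SOURCE A (Python) =====
-- def generate_node_text(resolved_name, file_content):
--     mapping = (
--         ('\\', r'\\'),
--         ('\n', r'\n'),
--         ("'", r"\'"),
--     )
--     output = file_content
--     for pair in mapping:
--         output = output.replace(*pair)
--     return (
--         u"<script>Ractive.TEMPLATES=Ractive.TEMPLATES||{{}};"
--         u"Ractive.TEMPLATES['{0}']=Ractive.parse('{1}');</script>"
--     ).format(resolved_name, output)
-- ===== SOURCE B (Python) =====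
-- def generate_node_text(resolved_name, file_content):
--     table = {'\\': '\\\\', '\n': '\\n', "'": "\\'"}
--     escaped = ''.join(table.get(c, c) for c in file_content)
--     return ("<script>Ractive.TEMPLATES=Ractive.TEMPLATES||{};"
--             "Ractive.TEMPLATES['" + resolved_name + "']=Ractive.parse('"
--             + escaped + "');</script>")
-- ===== Notes on version B (the rewrite author's own statement) =====
-- stated objective: alternative
-- what changed: B replaces A's three sequential whole-string .replace passes by a single per-character pass that maps each character through an escape table dict and joins the pieces, then builds the script tag by plain concatenation instead of str.format.
import Mathlib
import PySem

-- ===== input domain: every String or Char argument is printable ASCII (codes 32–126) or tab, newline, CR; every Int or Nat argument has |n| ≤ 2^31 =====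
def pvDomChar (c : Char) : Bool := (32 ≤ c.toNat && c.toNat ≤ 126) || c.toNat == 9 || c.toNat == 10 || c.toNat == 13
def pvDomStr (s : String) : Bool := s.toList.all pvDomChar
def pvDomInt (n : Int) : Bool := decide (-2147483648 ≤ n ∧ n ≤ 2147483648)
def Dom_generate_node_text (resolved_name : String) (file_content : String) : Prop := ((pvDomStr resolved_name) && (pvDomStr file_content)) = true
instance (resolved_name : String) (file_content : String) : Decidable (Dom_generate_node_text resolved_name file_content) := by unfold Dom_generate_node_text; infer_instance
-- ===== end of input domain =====

-- B escapes each character through a lookup table in one pass instead of A's three sequential replace scans; same return value.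

-- ===== PORT A =====
def generate_node_text (resolved_name : String) (file_content : String) : String :=
  let mapping : List (String × String) := [("\\", "\\\\"), ("\n", "\\n"), ("'", "\\'")]
  let output := mapping.foldl (fun out p => PySem.Str.replace out p.1 p.2) file_content
  "<script>Ractive.TEMPLATES=Ractive.TEMPLATES||{};Ractive.TEMPLATES['" ++ resolved_name
    ++ "']=Ractive.parse('" ++ output ++ "');</script>"

-- ===== PORT B =====
def pvEscTable : PySem.Dict Char String :=
  PySem.Dict.mk [('\\', "\\\\"), ('\n', "\\n"), ('\'', "\\'")]

def generate_node_text_alt (resolved_name : String) (file_content : String) : String :=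
  let escaped := PySem.Str.join ""
    (file_content.toList.map (fun c => (PySem.Dict.get? pvEscTable c).getD (String.ofList [c])))
  "<script>Ractive.TEMPLATES=Ractive.TEMPLATES||{};Ractive.TEMPLATES['" ++ resolved_name
    ++ "']=Ractive.parse('" ++ escaped ++ "');</script>"

-- ===== PRECONDITION & SPEC =====
def Spec_generate_node_text (resolved_name : String) (file_content : String) (out : String) : Prop := out = generate_node_text_alt resolved_name file_content
instance (resolved_name : String) (file_content : String) (out : String) : Decidable (Spec_generate_node_text resolved_name file_content out) := by unfold Spec_generate_node_text; infer_instance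

-- ===== CLAIM (what is proved, stated in full; the proofs are below) =====
def Claim_equal_generate_node_text : Prop := ∀ (resolved_name : String) (file_content : String), Dom_generate_node_text resolved_name file_content → Spec_generate_node_text resolved_name file_content (generate_node_text resolved_name file_content)

-- ===== LEMMAS AND PROOFS =====

-- replace with a single-character pattern acts independently on each character
theorem replace_go_single (o : Char) (new : List Char) :
    ∀ (s : List Char) (fuel : Nat) (acc : List Char), s.length ≤ fuel →
      PySem.Chars.replace.go [o] new fuel s acc
        = acc.reverse ++ s.flatMap (fun c => if c = o then new else [c]) := by
  intro s
  induction s with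
  | nil =>
    intro fuel acc _
    cases fuel <;> simp [PySem.Chars.replace.go]
  | cons c t ih =>
    intro fuel acc hle
    cases fuel with
    | zero => simp at hle
    | succ f =>
      by_cases hc : c = o
      · subst hc
        have hrec := ih f (new.reverse ++ acc) (by simpa using hle)
        simp [PySem.Chars.replace.go, List.isPrefixOf, hrec]
      · have hpre : List.isPrefixOf [o] (c :: t) = false := by
          simp [List.isPrefixOf]; exact fun h => (hc h.symm).elim
        have hrec := ih f (c :: acc) (by simpa using hle)
        simp [PySem.Chars.replace.go, hpre, hrec, hc]

theorem replace_single (s : List Char) (o : Char) (new : List Char) :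
    PySem.Chars.replace s [o] new = s.flatMap (fun c => if c = o then new else [c]) := by
  simpa [PySem.Chars.replace] using replace_go_single o new s s.length [] (le_refl _)

def pvEsc (c : Char) : List Char :=
  if c = '\\' then ['\\', '\\']
  else if c = '\n' then ['\\', 'n']
  else if c = '\'' then ['\\', '\''] else [c]

theorem flatMap_assoc (l : List Char) (f g : Char → List Char) :
    (l.flatMap f).flatMap g = l.flatMap (fun c => (f c).flatMap g) := by
  induction l with
  | nil => simp
  | cons a t ih => simp [ih]

-- the three chained replaces of A equal one flatMap with pvEsc
theorem chain_eq (fc : String) :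
    (PySem.Str.replace (PySem.Str.replace (PySem.Str.replace fc "\\" "\\\\") "\n" "\\n") "'" "\\'").toList
      = fc.toList.flatMap pvEsc := by
  simp only [PySem.Str.toList_replace]
  have h1 : ("\\" : String).toList = ['\\'] := by decide
  have h2 : ("\\\\" : String).toList = ['\\', '\\'] := by decide
  have h3 : ("\n" : String).toList = ['\n'] := by decide
  have h4 : ("\\n" : String).toList = ['\\', 'n'] := by decide
  have h5 : ("'" : String).toList = ['\''] := by decide
  have h6 : ("\\'" : String).toList = ['\\', '\''] := by decide
  rw [h1, h2, h3, h4, h5, h6, replace_single, replace_single, replace_single,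
      flatMap_assoc, flatMap_assoc]
  apply List.flatMap_congr
  intro c _
  by_cases hb : c = '\\'
  · subst hb; decide
  · by_cases hn : c = '\n'
    · subst hn; decide
    · by_cases hq : c = '\''
      · subst hq; decide
      · simp [pvEsc, hb, hn, hq]

-- join "" of the escaped pieces of B equals the same flatMap with pvEsc
theorem b_eq (fc : String) :
    (PySem.Str.join ""
      (fc.toList.map (fun c => (PySem.Dict.get? pvEscTable c).getD (String.ofList [c])))).toList
      = fc.toList.flatMap pvEsc := by
  rw [PySem.Str.toList_join]
  have hnil : ("" : String).toList = [] := by decide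
  rw [hnil]
  induction fc.toList with
  | nil => simp [PySem.Chars.join, List.intercalate]
  | cons c t ih =>
    have hstep : ∀ x xs, PySem.Chars.join [] (x :: xs) = x ++ PySem.Chars.join [] xs := by
      intro x xs
      cases xs <;> simp [PySem.Chars.join, List.intercalate]
    simp only [List.map_cons, List.flatMap_cons, hstep, ih]
    congr 1
    by_cases hb : c = '\\'
    · subst hb; decide
    · by_cases hn : c = '\n'
      · subst hn; decide
      · by_cases hq : c = '\''
        · subst hq; decide
        · have : PySem.Dict.get? pvEscTable c = none := by
            have b1 : ('\\' == c) = false := beq_eq_false_iff_ne.mpr (fun h => hb h.symm)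
            have b2 : ('\n' == c) = false := beq_eq_false_iff_ne.mpr (fun h => hn h.symm)
            have b3 : ('\'' == c) = false := beq_eq_false_iff_ne.mpr (fun h => hq h.symm)
            simp [pvEscTable, PySem.Dict.get?, List.find?, b1, b2, b3]
          simp [this, pvEsc, hb, hn, hq]

-- ===== VERDICT (by name: the statement is the Claim_ definition above) =====
theorem generate_node_text_spec : Claim_equal_generate_node_text := by
  intro resolved_name file_content _
  show _ = _
  unfold generate_node_text generate_node_text_alt
  rw [← String.toList_inj]
  simp only [String.toList_append, List.foldl]
  rw [chain_eq, b_eq]
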